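-- pv_equiv track=rewrite | github.com/Thomsch/ift6285-tp1 | loader.py | parse
-- ===== SOURCE A (Python) =====
-- def parse(file):
--     """
--     Parse a file into a tuple: (list of lemmatized sentences, list of original sentences). All the sentences
--     are converted into lower case and final point of the phrase is removed.
--     :param file: the file to parse
--     :return: the tuple
--     """
--     lines = file.splitlines()
--
--     lemmatized_sentences = []
--     original_sentences = []
--
--     lemmatized_sentence = ""
--     original_sentence = ""
--
--     for line in lines:
--         if line.startswith('#begin') or line.startswith('#end'):
--             continue
--
--         split = line.split()
--         if len(split) != 2:
--             continue
--
--         word, lemma = split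
--
--         if lemma == '.' and word == '.':
--             original_sentences.append(original_sentence.rstrip())
--             lemmatized_sentences.append(lemmatized_sentence.rstrip())
--             original_sentence = ""
--             lemmatized_sentence = ""
--         else:
--             original_sentence += word.lower() + ' '
--             lemmatized_sentence += lemma.lower() + ' '
--
--     return lemmatized_sentences, original_sentences
-- ===== SOURCE B (Python) =====
-- def parse(file):
--     # Phase 1: flat list of valid (word, lemma) pairs.
--     pairs = []
--     for line in file.splitlines():
--         if line.startswith('#begin') or line.startswith('#end'):
--             continue
--         parts = line.split()
--         if len(parts) == 2:
--             pairs.append((parts[0], parts[1]))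
--     # Phase 2: segment on ('.', '.') markers; a trailing unterminated group is dropped.
--     lemmatized_sentences = []
--     original_sentences = []
--     group = []
--     for pair in pairs:
--         if pair[1] == '.' and pair[0] == '.':
--             lemmatized_sentences.append(' '.join(p[1].lower() for p in group))
--             original_sentences.append(' '.join(p[0].lower() for p in group))
--             group = []
--         else:
--             group.append(pair)
--     return lemmatized_sentences, original_sentences
-- ===== Notes on version B (the rewrite author's own statement) =====
-- stated objective: alternative
-- what changed: A builds each sentence incrementally by string concatenation inside a single line loop and rstrips it at each end-of-sentence marker line; B first extracts the flat list of valid word/lemma pairs in one pass, then segments that pair list at the period-period marker pairs, producing each sentence with a space-join of the lowercased group.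
import Mathlib
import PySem

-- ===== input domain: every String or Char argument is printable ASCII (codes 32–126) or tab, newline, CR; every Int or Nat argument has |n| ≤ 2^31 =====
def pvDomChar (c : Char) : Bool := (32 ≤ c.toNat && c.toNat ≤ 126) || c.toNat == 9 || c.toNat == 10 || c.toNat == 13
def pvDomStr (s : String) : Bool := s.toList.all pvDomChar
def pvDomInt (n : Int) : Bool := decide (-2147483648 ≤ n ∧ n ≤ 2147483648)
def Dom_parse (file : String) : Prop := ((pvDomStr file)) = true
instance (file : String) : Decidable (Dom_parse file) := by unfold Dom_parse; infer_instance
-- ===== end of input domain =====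

-- B re-implements A in two phases (extract valid pairs, then segment on '.'/'.' markers and join);
-- objective: simpler/alternative decomposition, same cost.

-- ===== PORT A =====
-- A: single pass over the lines, growing two sentence strings character by character
-- and flushing their rstrip at each '.'/'.' marker line.
def parseStepA (st : List String × List String × List Char × List Char) (line : String) :
    List String × List String × List Char × List Char :=
  if PySem.Str.startswith line "#begin" || PySem.Str.startswith line "#end" then st
  else
    match PySem.Chars.split₀ line.toList with
    | [word, lem] =>
        if lem = ['.'] ∧ word = ['.'] then
          (st.1 ++ [String.mk (PySem.Chars.rstrip st.2.2.1)],
           st.2.1 ++ [String.mk (PySem.Chars.rstrip st.2.2.2)], [], [])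
        else
          (st.1, st.2.1, st.2.2.1 ++ PySem.Chars.lower lem ++ [' '],
           st.2.2.2 ++ PySem.Chars.lower word ++ [' '])
    | _ => st

def parse (file : String) : List String × List String :=
  (((PySem.Str.splitlines file).foldl parseStepA ([], [], [], [])).1,
   ((PySem.Str.splitlines file).foldl parseStepA ([], [], [], [])).2.1)

-- ===== PORT B =====
-- B phase 1: one pass collecting the valid (word, lemma) pairs.
def parsePairs (file : String) : List (List Char × List Char) :=
  (PySem.Str.splitlines file).filterMap (fun line =>
    if PySem.Str.startswith line "#begin" || PySem.Str.startswith line "#end" then none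
    else
      match PySem.Chars.split₀ line.toList with
      | [word, lem] => some (word, lem)
      | _ => none)

-- B phase 2: segment the pair list on ('.','.') markers; each emitted sentence is
-- ' '.join of the lowercased components of the current group.
def parseStepB (st : List String × List String × List (List Char × List Char))
    (p : List Char × List Char) : List String × List String × List (List Char × List Char) :=
  if p.2 = ['.'] ∧ p.1 = ['.'] then
    (st.1 ++ [String.mk (PySem.Chars.join [' '] (st.2.2.map (fun q => PySem.Chars.lower q.2)))],
     st.2.1 ++ [String.mk (PySem.Chars.join [' '] (st.2.2.map (fun q => PySem.Chars.lower q.1)))],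
     [])
  else (st.1, st.2.1, st.2.2 ++ [p])

def parse_alt (file : String) : List String × List String :=
  (((parsePairs file).foldl parseStepB ([], [], [])).1,
   ((parsePairs file).foldl parseStepB ([], [], [])).2.1)

-- ===== PRECONDITION & SPEC =====
def Spec_parse (file : String) (out : List String × List String) : Prop := out = parse_alt file
instance (file : String) (out : List String × List String) : Decidable (Spec_parse file out) := by unfold Spec_parse; infer_instance

-- ===== CLAIM (what is proved, stated in full; the proofs are below) =====
def Claim_equal_parse : Prop := ∀ (file : String), Dom_parse file → Spec_parse file (parse file)

-- ===== LEMMAS AND PROOFS =====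

-- A word is "clean" when it is nonempty and contains no whitespace (split() words are).
def CleanW (w : List Char) : Prop := w ≠ [] ∧ ∀ c ∈ w, PySem.Chars.isspace c = false

-- the pair-level form of A's loop body, used to align A's line loop with B's pair loop
def stepAPair (st : List String × List String × List Char × List Char)
    (p : List Char × List Char) : List String × List String × List Char × List Char :=
  if p.2 = ['.'] ∧ p.1 = ['.'] then
    (st.1 ++ [String.mk (PySem.Chars.rstrip st.2.2.1)],
     st.2.1 ++ [String.mk (PySem.Chars.rstrip st.2.2.2)], [], [])
  else
    (st.1, st.2.1, st.2.2.1 ++ PySem.Chars.lower p.2 ++ [' '],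
     st.2.2.2 ++ PySem.Chars.lower p.1 ++ [' '])

def tokOf (line : String) : Option (List Char × List Char) :=
  if PySem.Str.startswith line "#begin" || PySem.Str.startswith line "#end" then none
  else
    match PySem.Chars.split₀ line.toList with
    | [word, lem] => some (word, lem)
    | _ => none

def buildL (cur : List (List Char × List Char)) : List Char :=
  List.flatten (cur.map (fun q => PySem.Chars.lower q.2 ++ [' ']))

def buildO (cur : List (List Char × List Char)) : List Char :=
  List.flatten (cur.map (fun q => PySem.Chars.lower q.1 ++ [' ']))

theorem stepA_tok (st : List String × List String × List Char × List Char) (line : String) :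
    parseStepA st line = (tokOf line).elim st (stepAPair st) := by
  unfold parseStepA tokOf stepAPair
  by_cases h : (PySem.Str.startswith line "#begin" || PySem.Str.startswith line "#end") = true
  · rw [if_pos h, if_pos h]
    rfl
  · rw [if_neg h, if_neg h]
    match hs : PySem.Chars.split₀ line.toList with
    | [] => simp
    | [w] => simp
    | [w, l] => simp
    | w :: l :: c :: rest => simp

theorem foldl_filterMap {α β γ : Type} (f : α → Option β) (g : γ → β → γ)
    (l : List α) (init : γ) :
    List.foldl g init (l.filterMap f) =
      List.foldl (fun s x => (f x).elim s (g s)) init l := by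
  induction l generalizing init with
  | nil => rfl
  | cons a t ih =>
    cases h : f a with
    | none => simp [h, ih]
    | some b => simp [h, ih]

theorem split₀_go_clean (cs cur : List Char) (acc : List (List Char))
    (hacc : ∀ w ∈ acc, CleanW w) (hcur : ∀ c ∈ cur, PySem.Chars.isspace c = false) :
    ∀ w ∈ PySem.Chars.split₀.go cs cur acc, CleanW w := by
  induction cs generalizing cur acc with
  | nil =>
    intro w hw
    unfold PySem.Chars.split₀.go at hw
    by_cases h : cur.isEmpty = true
    · rw [if_pos h] at hw
      exact hacc w (by simpa using hw)
    · rw [if_neg h] at hw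
      rcases List.mem_cons.1 (List.mem_reverse.1 hw) with rfl | hw'
      · refine ⟨fun hre => h (by simp [List.isEmpty_iff, ← List.reverse_eq_nil_iff, hre]), ?_⟩
        intro c hc; exact hcur c (List.mem_reverse.1 hc)
      · exact hacc w hw'
  | cons c rest ih =>
    intro w hw
    unfold PySem.Chars.split₀.go at hw
    by_cases hs : PySem.Chars.isspace c = true
    · rw [if_pos hs] at hw
      by_cases he : cur.isEmpty = true
      · rw [if_pos he] at hw
        exact ih [] acc hacc (by simp) w hw
      · rw [if_neg he] at hw
        refine ih [] (cur.reverse :: acc) ?_ (by simp) w hw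
        intro v hv
        rcases List.mem_cons.1 hv with rfl | hv
        · refine ⟨fun hre => he (by simp [List.isEmpty_iff, ← List.reverse_eq_nil_iff, hre]), ?_⟩
          intro d hd; exact hcur d (List.mem_reverse.1 hd)
        · exact hacc v hv
    · rw [if_neg hs] at hw
      refine ih (c :: cur) acc hacc ?_ w hw
      intro d hd
      rcases List.mem_cons.1 hd with rfl | hd
      · exact Bool.not_eq_true _ ▸ (by simpa using hs)
      · exact hcur d hd

theorem split₀_clean (s : List Char) : ∀ w ∈ PySem.Chars.split₀ s, CleanW w := by
  unfold PySem.Chars.split₀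
  exact split₀_go_clean s [] [] (by simp) (by simp)

theorem tokOf_clean (line : String) (p : List Char × List Char) (h : tokOf line = some p) :
    CleanW p.1 ∧ CleanW p.2 := by
  unfold tokOf at h
  by_cases hb : (PySem.Str.startswith line "#begin" || PySem.Str.startswith line "#end") = true
  · rw [if_pos hb] at h; exact absurd h (by simp)
  · rw [if_neg hb] at h
    match hs : PySem.Chars.split₀ line.toList with
    | [] => rw [hs] at h; exact absurd h (by simp)
    | [w] => rw [hs] at h; exact absurd h (by simp)
    | [w, l] =>
      rw [hs] at h
      obtain rfl : (w, l) = p := by simpa using h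
      exact ⟨split₀_clean _ w (by rw [hs]; simp), split₀_clean _ l (by rw [hs]; simp)⟩
    | w :: l :: c :: rest => rw [hs] at h; exact absurd h (by simp)

theorem isspace_false_of_bounds (x : Char) (h1 : 65 ≤ x.toNat) (h2 : x.toNat ≤ 122) :
    PySem.Chars.isspace x = false := by
  unfold PySem.Chars.isspace
  simp only [Bool.or_eq_false_iff, Bool.and_eq_false_iff, decide_eq_false_iff_not]
  omega

theorem isspace_lowerChar (c : Char) :
    PySem.Chars.isspace (PySem.Chars.lowerChar c) = PySem.Chars.isspace c := by
  unfold PySem.Chars.lowerChar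
  by_cases h : PySem.Chars.isupper c = true
  · rw [if_pos h]
    unfold PySem.Chars.isupper at h
    simp only [Bool.and_eq_true, decide_eq_true_eq, Char.le_def] at h
    have hA : ('A' : Char).toNat = 65 := rfl
    have hZ : ('Z' : Char).toNat = 90 := rfl
    have h1 : 65 ≤ c.toNat := hA ▸ h.1
    have h2 : c.toNat ≤ 90 := hZ ▸ h.2
    have hvalid : Nat.isValidChar (c.toNat + 32) := Or.inl (by omega)
    have ht : (Char.ofNat (c.toNat + 32)).toNat = c.toNat + 32 := by
      rw [Char.toNat_ofNat, if_pos hvalid]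
    rw [isspace_false_of_bounds _ (by omega) (by omega),
        isspace_false_of_bounds c (by omega) (by omega)]
  · rw [if_neg h]

theorem clean_lower (w : List Char) (h : CleanW w) : CleanW (PySem.Chars.lower w) := by
  obtain ⟨h1, h2⟩ := h
  refine ⟨by simpa [PySem.Chars.lower] using h1, ?_⟩
  intro c hc
  unfold PySem.Chars.lower at hc
  rcases List.mem_map.1 hc with ⟨d, hd, rfl⟩
  rw [isspace_lowerChar]
  exact h2 d hd

theorem rstrip_append_space (x : List Char) :
    PySem.Chars.rstrip (x ++ [' ']) = PySem.Chars.rstrip x := by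
  unfold PySem.Chars.rstrip
  simp [show PySem.Chars.isspace ' ' = true by decide]

theorem rstrip_clean (w : List Char) (h : ∀ c ∈ w, PySem.Chars.isspace c = false) :
    PySem.Chars.rstrip w = w := by
  unfold PySem.Chars.rstrip
  have hd : List.dropWhile PySem.Chars.isspace w.reverse = w.reverse := by
    cases hw : w.reverse with
    | nil => simp
    | cons a t =>
      have ha : PySem.Chars.isspace a = false :=
        h a (by rw [← List.mem_reverse, hw]; simp)
      simp [ha]
  rw [hd, List.reverse_reverse]

theorem rstrip_append (a b : List Char) (h : PySem.Chars.rstrip b ≠ []) :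
    PySem.Chars.rstrip (a ++ b) = a ++ PySem.Chars.rstrip b := by
  have hne : (List.dropWhile PySem.Chars.isspace b.reverse).isEmpty = false := by
    cases he : (List.dropWhile PySem.Chars.isspace b.reverse).isEmpty
    · rfl
    · exact absurd (show PySem.Chars.rstrip b = [] by
        unfold PySem.Chars.rstrip; rw [List.isEmpty_iff.1 he]; rfl) h
  unfold PySem.Chars.rstrip
  rw [List.reverse_append, List.dropWhile_append, hne]
  simp

theorem rstrip_flatten (ws : List (List Char)) (h : ∀ w ∈ ws, CleanW w) :
    PySem.Chars.rstrip (List.flatten (ws.map (· ++ [' ']))) = PySem.Chars.join [' '] ws := by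
  induction ws with
  | nil => simp [PySem.Chars.rstrip, PySem.Chars.join, List.intercalate]
  | cons w t ih =>
    match t with
    | [] =>
      have hw := h w (by simp)
      simp only [List.map, List.flatten_cons, List.flatten_nil, List.append_nil,
        PySem.Chars.join_singleton]
      rw [rstrip_append_space, rstrip_clean w hw.2]
    | r :: t' =>
      have hr := h r (by simp)
      have hrest := ih (fun v hv => h v (by simp [hv]))
      have hne : PySem.Chars.rstrip (List.flatten ((r :: t').map (· ++ [' ']))) ≠ [] := by
        rw [hrest]
        match t' with
        | [] => simpa [PySem.Chars.join_singleton] using hr.1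
        | s :: t'' =>
          rw [PySem.Chars.join_cons_cons]
          intro hre
          simp at hre
      calc PySem.Chars.rstrip (List.flatten ((w :: r :: t').map (· ++ [' '])))
          = PySem.Chars.rstrip ((w ++ [' ']) ++ List.flatten ((r :: t').map (· ++ [' ']))) := by
            simp [List.flatten]
        _ = (w ++ [' ']) ++ PySem.Chars.rstrip (List.flatten ((r :: t').map (· ++ [' ']))) :=
            rstrip_append _ _ hne
        _ = (w ++ [' ']) ++ PySem.Chars.join [' '] (r :: t') := by rw [hrest]
        _ = PySem.Chars.join [' '] (w :: r :: t') := by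
            rw [PySem.Chars.join_cons_cons]

theorem buildL_eq (cur : List (List Char × List Char))
    (h : ∀ p ∈ cur, CleanW p.1 ∧ CleanW p.2) :
    PySem.Chars.rstrip (buildL cur) =
      PySem.Chars.join [' '] (cur.map (fun q => PySem.Chars.lower q.2)) := by
  unfold buildL
  rw [show cur.map (fun q => PySem.Chars.lower q.2 ++ [' '])
        = (cur.map (fun q => PySem.Chars.lower q.2)).map (· ++ [' ']) by simp]
  exact rstrip_flatten _ (by
    intro w hw
    rcases List.mem_map.1 hw with ⟨p, hp, rfl⟩
    exact clean_lower _ (h p hp).2)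

theorem buildO_eq (cur : List (List Char × List Char))
    (h : ∀ p ∈ cur, CleanW p.1 ∧ CleanW p.2) :
    PySem.Chars.rstrip (buildO cur) =
      PySem.Chars.join [' '] (cur.map (fun q => PySem.Chars.lower q.1)) := by
  unfold buildO
  rw [show cur.map (fun q => PySem.Chars.lower q.1 ++ [' '])
        = (cur.map (fun q => PySem.Chars.lower q.1)).map (· ++ [' ']) by simp]
  exact rstrip_flatten _ (by
    intro w hw
    rcases List.mem_map.1 hw with ⟨p, hp, rfl⟩
    exact clean_lower _ (h p hp).1)

theorem main_inv (ps : List (List Char × List Char))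
    (hps : ∀ p ∈ ps, CleanW p.1 ∧ CleanW p.2)
    (ls os : List String) (cur : List (List Char × List Char))
    (hcur : ∀ p ∈ cur, CleanW p.1 ∧ CleanW p.2) :
    (List.foldl stepAPair (ls, os, buildL cur, buildO cur) ps).1
        = (List.foldl parseStepB (ls, os, cur) ps).1 ∧
    (List.foldl stepAPair (ls, os, buildL cur, buildO cur) ps).2.1
        = (List.foldl parseStepB (ls, os, cur) ps).2.1 := by
  induction ps generalizing ls os cur with
  | nil => exact ⟨rfl, rfl⟩
  | cons p rest ih =>
    have hp := hps p (by simp)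
    have hrest : ∀ q ∈ rest, CleanW q.1 ∧ CleanW q.2 := fun q hq => hps q (by simp [hq])
    by_cases hm : p.2 = ['.'] ∧ p.1 = ['.']
    · have hA : stepAPair (ls, os, buildL cur, buildO cur) p
          = (ls ++ [String.mk (PySem.Chars.rstrip (buildL cur))],
             os ++ [String.mk (PySem.Chars.rstrip (buildO cur))], [], []) := by
        simp [stepAPair, hm]
      have hB : parseStepB (ls, os, cur) p
          = (ls ++ [String.mk (PySem.Chars.join [' '] (cur.map (fun q => PySem.Chars.lower q.2)))],
             os ++ [String.mk (PySem.Chars.join [' '] (cur.map (fun q => PySem.Chars.lower q.1)))],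
             []) := by
        simp [parseStepB, hm]
      simp only [List.foldl_cons, hA, hB, buildL_eq cur hcur, buildO_eq cur hcur]
      have := ih hrest
        (ls ++ [String.mk (PySem.Chars.join [' '] (cur.map (fun q => PySem.Chars.lower q.2)))])
        (os ++ [String.mk (PySem.Chars.join [' '] (cur.map (fun q => PySem.Chars.lower q.1)))])
        [] (by simp)
      simpa [buildL, buildO] using this
    · have hA : stepAPair (ls, os, buildL cur, buildO cur) p
          = (ls, os, buildL (cur ++ [p]), buildO (cur ++ [p])) := by
        simp [stepAPair, hm, buildL, buildO]
      have hB : parseStepB (ls, os, cur) p = (ls, os, cur ++ [p]) := by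
        simp [parseStepB, hm]
      simp only [List.foldl_cons, hA, hB]
      exact ih hrest ls os (cur ++ [p]) (by
        intro q hq
        rcases List.mem_append.1 hq with hq | hq
        · exact hcur q hq
        · simpa [List.mem_singleton.1 hq] using hp)

-- ===== VERDICT (by name: the statement is the Claim_ definition above) =====
theorem parse_spec : Claim_equal_parse := by
  intro file _
  unfold Spec_parse parse parse_alt
  have hfg : parseStepA = fun s x => (tokOf x).elim s (stepAPair s) :=
    funext fun s => funext fun x => stepA_tok s x
  rw [hfg, ← foldl_filterMap tokOf stepAPair (PySem.Str.splitlines file) ([], [], [], [])]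
  have hpairs : parsePairs file = (PySem.Str.splitlines file).filterMap tokOf := rfl
  have hclean : ∀ p ∈ (PySem.Str.splitlines file).filterMap tokOf, CleanW p.1 ∧ CleanW p.2 := by
    intro p hp
    rcases List.mem_filterMap.1 hp with ⟨line, _, h⟩
    exact tokOf_clean line p h
  have := main_inv ((PySem.Str.splitlines file).filterMap tokOf) hclean [] [] [] (by simp)
  rw [hpairs]
  exact Prod.ext (by simpa [buildL, buildO] using this.1)
    (by simpa [buildL, buildO] using this.2)
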